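-- pv_equiv track=rewrite | github.com/ferotimk/zapoctovy-program | matrix.py | is_pos_def
-- ===== SOURCE A (Python) =====
-- def matrix_height(A):
--     if A == False:
--         return 0
--     else:
--         return len(A)
--
-- def matrix_width(A):
--     if  A == False:
--         return 0
--     else:
--         return len(A[0])
--
-- def is_square(A):
--     if matrix_height(A) == matrix_width(A):
--         return True
--     else:
--         return False
--
-- def submatrix(A, i, j):
--     #vrati podmatici vzniklou vynechanim i-teho radku a j-teho sloupce
--     m = matrix_height(A)
--     n = matrix_width(A)
--     #zde si vytvarime kopii matice, jinak by fce zmenila puvodni matici misto vraceni nove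
--     B = [[0 for o in range(n)] for p in range(m)]
--     for x in range(m):
--         for l in range(n):
--             B[x][l] = A[x][l]
--     B.pop(i)
--     for k in range(n - 1):
--         B[k].pop(j)
--     return B
--
-- def determinant_2(A, det = 0):
--     #vypocet determinanatu pomoci rozvoje podle prvniho radku (pro zajimavost)
--     if is_square(A) == False:
--         return False
--     else:
--         n = matrix_height(A)
--         if n == 1:
--             return A[0][0]
--         else:
--             n = matrix_width(A)
--             for i in range(n):
--                 det += (A[0][i])*((-1)**i)*determinant_2(submatrix(A, 0, i))
--             return det
--
-- def is_pos_def(A):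
--     #funkce, ktera urci zda je matice pozitivne definitni metodou subdeterminantu
--     if is_square(A) == False:
--         return False
--     else:
--         n = matrix_width(A)
--         B = [[0 for o in range(n)] for p in  range(n)]
--         for x in range(n):
--             for l in range(n):
--                 B[x][l] = A[x][l]
--         a = 0
--         for i in range(n):
--             det = determinant_2(B)
--             if det <= 0:
--                 a += 1
--                 break
--             B = submatrix(B, 0, 0)
--         if a == 0:
--             return True
--         else:
--             return False
-- ===== SOURCE B (Python) =====
-- def is_pos_def(A):
--     # Division-free Gaussian elimination from the bottom-right corner: each pivot is a
--     # positive multiple of one trailing principal minor, so all pivots > 0 iff all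
--     # trailing principal minors > 0 (the criterion A checks by n! cofactor expansion).
--     n = len(A)
--     if not A or len(A[0]) != n:
--         return False
--     M = [row[:n] for row in A]
--     while M:
--         m = len(M)
--         p = M[m - 1][m - 1]
--         if p <= 0:
--             return False
--         M = [[p * M[i][j] - M[i][m - 1] * M[m - 1][j] for j in range(m - 1)]
--              for i in range(m - 1)]
--     return True
-- ===== Notes on version B (the rewrite author's own statement) =====
-- stated objective: faster
-- what changed: Replaced the O(n*n!) recursive Laplace-expansion subdeterminant test by one division-free Gaussian elimination from the bottom-right corner whose successive pivots are positive multiples of the trailing principal minors A checks.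
import Mathlib
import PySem

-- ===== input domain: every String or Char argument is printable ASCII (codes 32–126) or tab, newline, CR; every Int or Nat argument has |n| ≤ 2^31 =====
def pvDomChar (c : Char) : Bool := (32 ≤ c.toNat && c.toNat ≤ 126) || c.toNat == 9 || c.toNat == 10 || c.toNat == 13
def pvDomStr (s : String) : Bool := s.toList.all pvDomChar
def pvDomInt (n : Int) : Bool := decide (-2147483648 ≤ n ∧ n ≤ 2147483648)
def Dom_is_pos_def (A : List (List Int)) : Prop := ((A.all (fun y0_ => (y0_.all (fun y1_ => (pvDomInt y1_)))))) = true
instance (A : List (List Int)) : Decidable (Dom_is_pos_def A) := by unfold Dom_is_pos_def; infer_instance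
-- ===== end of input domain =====

-- B replaces A's O(n·n!) recursive Laplace-expansion subdeterminant test by one division-free
-- Gaussian elimination from the bottom-right corner (objective: faster, measured).

-- ===== PORT A =====
-- the nested fill loops 'B = zeros; B[x][l] = A[x][l]' (an m×n truncated copy)
def pvCopy (A : List (List Int)) (m n : Nat) : List (List Int) :=
  (List.range m).map (fun x => (List.range n).map (fun l => (A.getD x []).getD l 0))

-- submatrix(A, i, j): copy, pop row i, then pop column j from the first n-1 rows
def pvSubm (A : List (List Int)) (i j : Nat) : List (List Int) :=
  let m := A.length
  let n := (A.headD []).length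
  let B := pvCopy A m n
  let B := B.eraseIdx i
  B.mapIdx (fun k row => if k < n - 1 then row.eraseIdx j else row)

-- needed by pvDet's termination proof
theorem pvSubm_len (A : List (List Int)) (j : Nat) (_h : 0 < A.length) :
    (pvSubm A 0 j).length = A.length - 1 := by
  simp [pvSubm, pvCopy]

-- determinant_2: recursive expansion along the first row (the non-square branch returns
-- Python's False, which behaves as 0 and is unreachable from is_pos_def)
def pvDet (A : List (List Int)) : Int :=
  if A.length = (A.headD []).length then
    if A.length = 1 then (A.headD []).headD 0
    else ((List.range A.length).attach.map
      (fun i => (A.headD []).getD i.1 0 * (-1 : Int) ^ i.1 * pvDet (pvSubm A 0 i.1))).sum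
  else 0
termination_by A.length
decreasing_by
  have hi := List.mem_range.mp i.2
  rw [pvSubm_len A i.1 (by omega)]
  omega

-- the 'for i in range(n): det…; if det <= 0: break; B = submatrix(B,0,0)' loop with its flag
def pvLoop (B : List (List Int)) : Nat → Bool
  | 0 => true
  | k + 1 => if pvDet B ≤ 0 then false else pvLoop (pvSubm B 0 0) k

def is_pos_def (A : List (List Int)) : Bool :=
  if A.length = (A.headD []).length then
    pvLoop (pvCopy A (A.headD []).length (A.headD []).length) (A.headD []).length
  else false

-- ===== PORT B =====
-- one elimination step: pivot = bottom-right entry, produce the (m-1)×(m-1) matrix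
-- p*M[i][j] - M[i][m-1]*M[m-1][j]
def altStep (M : List (List Int)) : List (List Int) :=
  let m := M.length
  let p := (M.getD (m - 1) []).getD (m - 1) 0
  (List.range (m - 1)).map (fun i => (List.range (m - 1)).map (fun j =>
    p * (M.getD i []).getD j 0 - (M.getD i []).getD (m - 1) 0 * (M.getD (m - 1) []).getD j 0))

theorem altStep_len (M : List (List Int)) : (altStep M).length = M.length - 1 := by
  simp [altStep]

-- the 'while M:' loop
def altLoop (M : List (List Int)) : Bool :=
  if M = [] then true
  else
    let m := M.length
    let p := (M.getD (m - 1) []).getD (m - 1) 0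
    if p ≤ 0 then false else altLoop (altStep M)
termination_by M.length
decreasing_by
  rw [altStep_len]
  have : M.length ≠ 0 := by simpa [List.length_eq_zero_iff] using ‹¬M = []›
  omega

def is_pos_def_alt (A : List (List Int)) : Bool :=
  if A = [] then false
  else if (A.headD []).length ≠ A.length then false
  else altLoop (A.map (fun r => r.take A.length))

-- ===== PRECONDITION & SPEC =====
-- Pre_ excludes only inputs where Python A raises: the empty matrix (A[0] → IndexError) and
-- square matrices with a row shorter than n (the copy loop's A[x][l] → IndexError).
def Pre_is_pos_def (A : List (List Int)) : Prop :=
  A ≠ [] ∧ (A.length = (A.headD []).length → ∀ r ∈ A, A.length ≤ r.length)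
instance (A : List (List Int)) : Decidable (Pre_is_pos_def A) := by
  unfold Pre_is_pos_def; infer_instance

def pvWitness_is_pos_def : List (List Int) := [[2, 0], [0, 3]]

def Spec_is_pos_def (A : List (List Int)) (out : Bool) : Prop := out = is_pos_def_alt A
instance (A : List (List Int)) (out : Bool) : Decidable (Spec_is_pos_def A out) := by
  unfold Spec_is_pos_def; infer_instance

-- ===== CLAIM (what is proved, stated in full; the proofs are below) =====
def Claim_equal_is_pos_def : Prop :=
  ∀ (A : List (List Int)), Dom_is_pos_def A → Pre_is_pos_def A →
    Spec_is_pos_def A (is_pos_def A)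

-- ===== LEMMAS AND PROOFS =====

-- the infinite-plane view of a list matrix (entries out of range read 0; only in-range
-- entries are ever used by the statements below)
def matL (M : List (List Int)) : Nat → Nat → Int := fun i j => (M.getD i []).getD j 0

-- determinant of the top-left m×m block
def Dm (m : Nat) (f : Nat → Nat → Int) : Int := (Matrix.of fun i j : Fin m => f i j).det

def shiftF (s : Nat) (f : Nat → Nat → Int) : Nat → Nat → Int := fun i j => f (i + s) (j + s)

-- all trailing principal minors of the top-left n×n block are positive
def PminPos (n : Nat) (f : Nat → Nat → Int) : Prop :=
  ∀ i, i < n → 0 < Dm (n - i) (shiftF i f)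

-- the elimination step as an operation on the plane (block size m)
def elimF (m : Nat) (f : Nat → Nat → Int) : Nat → Nat → Int :=
  fun i j => f (m - 1) (m - 1) * f i j - f i (m - 1) * f (m - 1) j

theorem Dm_congr (m : Nat) (f g : Nat → Nat → Int)
    (h : ∀ i j, i < m → j < m → f i j = g i j) : Dm m f = Dm m g := by
  unfold Dm; congr 1; ext i j; exact h i j i.2 j.2

theorem PminPos_congr (n : Nat) (f g : Nat → Nat → Int)
    (h : ∀ i j, i < n → j < n → f i j = g i j) : PminPos n f ↔ PminPos n g := by
  unfold PminPos
  refine forall₂_congr (fun i hi => ?_)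
  rw [Dm_congr (n - i) (shiftF i f) (shiftF i g)
    (fun a b ha hb => h (a + i) (b + i) (by omega) (by omega))]

theorem Dm_one (f : Nat → Nat → Int) : Dm 1 f = f 0 0 := by
  unfold Dm; rw [Matrix.det_fin_one]; rfl

theorem shiftF_zero (f : Nat → Nat → Int) : shiftF 0 f = f := rfl

theorem shiftF_shiftF (s t : Nat) (f : Nat → Nat → Int) :
    shiftF s (shiftF t f) = shiftF (s + t) f := by
  funext i j; simp only [shiftF, Nat.add_assoc]

-- peel the full block off PminPos
theorem PminPos_succ (n : Nat) (f : Nat → Nat → Int) :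
    PminPos (n + 1) f ↔ 0 < Dm (n + 1) f ∧ PminPos n (shiftF 1 f) := by
  constructor
  · intro h
    refine ⟨by simpa [shiftF_zero] using h 0 (by omega), ?_⟩
    intro i hi
    rw [shiftF_shiftF]
    have h2 := h (i + 1) (by omega)
    have e : n + 1 - (i + 1) = n - i := by omega
    rw [e] at h2
    exact h2
  · rintro ⟨h0, h⟩ i hi
    cases i with
    | zero => simpa [shiftF_zero] using h0
    | succ k =>
      have h2 := h k (by omega)
      rw [shiftF_shiftF] at h2
      have e : n - k = n + 1 - (k + 1) := by omega
      rw [e] at h2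
      exact h2

-- exactness facts
theorem pvCopy_len (A : List (List Int)) (m n : Nat) : (pvCopy A m n).length = m := by
  simp [pvCopy]

theorem pvCopy_rows (A : List (List Int)) (m n : Nat) :
    ∀ r ∈ pvCopy A m n, r.length = n := by
  intro r hr
  simp [pvCopy] at hr
  obtain ⟨x, -, rfl⟩ := hr
  simp

theorem pvCopy_entry (A : List (List Int)) (m n i j : Nat) (hi : i < m) (hj : j < n) :
    matL (pvCopy A m n) i j = matL A i j := by
  simp [pvCopy, matL, List.getD_eq_getElem?_getD, hi, hj]

-- fill-loop copy of an exact matrix is the matrix itself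
theorem pvCopy_id (M : List (List Int)) (n : Nat)
    (hlen : M.length = n) (hrows : ∀ r ∈ M, r.length = n) :
    pvCopy M n n = M := by
  subst hlen
  apply List.ext_getElem (by simp [pvCopy])
  intro i h1 h2
  simp only [pvCopy, List.getElem_map, List.getElem_range]
  have hr : (M[i]).length = M.length := hrows _ (List.getElem_mem h2)
  apply List.ext_getElem (by simpa using hr.symm)
  intro k k1 k2
  simp only [List.getElem_map, List.getElem_range]
  have h3 : M.getD i [] = M[i] := by
    rw [List.getD_eq_getElem?_getD, List.getElem?_eq_getElem h2]; rfl
  rw [h3, List.getD_eq_getElem?_getD, List.getElem?_eq_getElem k2]; rfl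

-- submatrix(M,0,j) of an exact (n+1)×(n+1) matrix: drop first row, erase entry j of each row
theorem pvSubm_char (M : List (List Int)) (n j : Nat) (_hj : j < n + 1)
    (hlen : M.length = n + 1) (hrows : ∀ r ∈ M, r.length = n + 1) :
    pvSubm M 0 j = M.tail.map (fun r => r.eraseIdx j) := by
  have hhead : (M.headD []).length = n + 1 := by
    cases M with
    | nil => simp at hlen
    | cons a t => exact hrows a List.mem_cons_self
  show List.mapIdx _ ((pvCopy M M.length (M.headD []).length).eraseIdx 0) = _
  rw [hhead, hlen, pvCopy_id M (n + 1) hlen hrows, List.eraseIdx_zero]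
  apply List.ext_getElem (by simp)
  intro i h1 h2
  rw [List.getElem_mapIdx, List.getElem_map]
  have h3 : i < n := by
    simp only [List.length_mapIdx, List.length_tail, hlen] at h1; omega
  simp [h3]

theorem pvSubm_exact (M : List (List Int)) (n j : Nat) (hj : j < n + 1)
    (hlen : M.length = n + 1) (hrows : ∀ r ∈ M, r.length = n + 1) :
    (pvSubm M 0 j).length = n ∧ ∀ r ∈ pvSubm M 0 j, r.length = n := by
  rw [pvSubm_char M n j hj hlen hrows]
  constructor
  · simp [hlen]
  · intro r hr
    simp only [List.mem_map] at hr
    obtain ⟨s, hs, rfl⟩ := hr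
    have : s.length = n + 1 := hrows s (List.mem_of_mem_tail hs)
    rw [List.length_eraseIdx]
    simp [this, hj]

theorem pvSubm_entry (M : List (List Int)) (n j : Nat) (hj : j < n + 1)
    (hlen : M.length = n + 1) (hrows : ∀ r ∈ M, r.length = n + 1) :
    ∀ i k, i < n → k < n →
      matL (pvSubm M 0 j) i k = matL M (i + 1) (if k < j then k else k + 1) := by
  intro i k hi hk
  rw [pvSubm_char M n j hj hlen hrows]
  have hti : i < M.tail.length := by simp [hlen]; omega
  have hi1 : i + 1 < M.length := by omega
  have hrowlen : (M.tail[i]).length = n + 1 := hrows _ (List.mem_of_mem_tail (List.getElem_mem hti))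
  unfold matL
  have htail : M.tail[i] = M[i + 1] := by
    cases M with
    | nil => simp at hlen
    | cons a t => simp
  have hout : (List.map (fun r => r.eraseIdx j) M.tail).getD i [] = M.tail[i].eraseIdx j := by
    rw [List.getD_eq_getElem?_getD, List.getElem?_map, List.getElem?_eq_getElem hti,
        Option.map_some, Option.getD_some]
  have hout2 : M.getD (i + 1) [] = M[i + 1] := by
    rw [List.getD_eq_getElem?_getD, List.getElem?_eq_getElem hi1]; rfl
  rw [hout, hout2]
  have hek : k < (M.tail[i].eraseIdx j).length := by
    rw [List.length_eraseIdx, hrowlen]; split <;> omega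
  have hk2 : (if k < j then k else k + 1) < (M[i + 1]).length := by
    have hr2 := hrowlen; rw [htail] at hr2; rw [hr2]; split <;> omega
  rw [List.getD_eq_getElem?_getD, List.getElem?_eq_getElem hek,
      List.getD_eq_getElem?_getD, List.getElem?_eq_getElem hk2]
  simp only [Option.getD_some, List.getElem_eraseIdx, htail]
  by_cases h : k < j <;> simp [h]

theorem attach_map_sum (l : List Nat) (f : Nat → Int) :
    (l.attach.map (fun i => f i.1)).sum = (l.map f).sum := by
  rw [List.attach_map_val]

theorem fin_succAbove_val (n : Nat) (j : Fin (n + 1)) (b : Fin n) :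
    (j.succAbove b : ℕ) = if (b : ℕ) < (j : ℕ) then (b : ℕ) else (b : ℕ) + 1 := by
  by_cases h : (b : ℕ) < (j : ℕ)
  · rw [Fin.succAbove_of_castSucc_lt j b (by simpa [Fin.lt_def] using h), if_pos h]
    rfl
  · rw [Fin.succAbove_of_le_castSucc j b (by simpa [Fin.le_def] using Nat.le_of_not_lt h), if_neg h]
    rfl

theorem list_sum_range (n : Nat) (f : Nat → Int) :
    ((List.range n).map f).sum = ∑ i ∈ Finset.range n, f i := by
  induction n with
  | zero => simp
  | succ k ih => rw [List.range_succ, List.map_append, List.sum_append,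
      Finset.sum_range_succ, ih]; simp

-- A's determinant routine computes the determinant of the exact matrix
theorem pvDet_eq (n : Nat) : ∀ M : List (List Int), M.length = n + 1 →
    (∀ r ∈ M, r.length = n + 1) → pvDet M = Dm (n + 1) (matL M) := by
  induction n using Nat.strong_induction_on with
  | _ n IH =>
  intro M hlen hrows
  have hne : M ≠ [] := by intro h; rw [h] at hlen; simp at hlen
  have hh : (M.headD []).length = n + 1 := by
    cases M with
    | nil => exact absurd rfl hne
    | cons a t => exact hrows a List.mem_cons_self
  have hhd : ∀ j, (M.headD []).getD j 0 = matL M 0 j := by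
    intro j
    cases M with
    | nil => exact absurd rfl hne
    | cons a t => rfl
  rw [pvDet, if_pos (by rw [hlen, hh])]
  cases n with
  | zero =>
    rw [if_pos (by rw [hlen]), Dm_one]
    rw [← hhd 0]
    cases M with
    | nil => exact absurd rfl hne
    | cons a t =>
      have : a.length = 1 := hrows a List.mem_cons_self
      cases a with
      | nil => simp at this
      | cons x s => rfl
  | succ m =>
    rw [if_neg (by rw [hlen]; omega)]
    -- turn the attached list sum into a Finset.range sum
    rw [attach_map_sum (List.range M.length)
      (fun j => (M.headD []).getD j 0 * (-1 : Int) ^ j * pvDet (pvSubm M 0 j)), hlen,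
      list_sum_range]
    -- Laplace expansion of the right-hand side
    have hexp := Matrix.det_succ_row_zero (Matrix.of fun i j : Fin (m + 2) => matL M i j)
    have hsub : ∀ j : Fin (m + 2),
        Matrix.det ((Matrix.of fun i j : Fin (m + 2) => matL M i j).submatrix Fin.succ j.succAbove)
          = Dm (m + 1) (matL (pvSubm M 0 j.1)) := by
      intro j
      have hse := pvSubm_entry M (m + 1) j.1 j.2 hlen hrows
      unfold Dm
      congr 1
      ext a b
      simp only [Matrix.submatrix_apply, Matrix.of_apply]
      rw [hse a b a.2 b.2, fin_succAbove_val (m + 1) j b]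
      rfl
    have hsum : Dm (m + 2) (matL M) =
        ∑ j ∈ Finset.range (m + 2),
          (-1 : Int) ^ j * matL M 0 j * Dm (m + 1) (matL (pvSubm M 0 j)) := by
      unfold Dm
      rw [hexp]
      rw [← Fin.sum_univ_eq_sum_range
        (fun j => (-1 : Int) ^ j * matL M 0 j *
          (Matrix.of fun a b : Fin (m + 1) => matL (pvSubm M 0 j) a b).det) (m + 2)]
      refine Finset.sum_congr rfl (fun j _ => ?_)
      have h2 := hsub j
      unfold Dm at h2
      rw [h2]
      rfl
    rw [hsum]
    refine Finset.sum_congr rfl (fun j hj => ?_)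
    have hjlt : j < m + 2 := Finset.mem_range.mp hj
    have hde := pvSubm_exact M (m + 1) j hjlt hlen hrows
    rw [IH m (by omega) (pvSubm M 0 j) hde.1 hde.2, hhd j]
    ring

-- A's loop checks positivity of all trailing principal minors
theorem loopA_iff (n : Nat) : ∀ M : List (List Int), M.length = n →
    (∀ r ∈ M, r.length = n) → (pvLoop M n = true ↔ PminPos n (matL M)) := by
  induction n with
  | zero =>
    intro M hlen hrows
    simp only [pvLoop]
    constructor
    · intro _ i hi; omega
    · intro _; trivial
  | succ n IH =>
    intro M hlen hrows
    have hd := pvDet_eq n M hlen hrows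
    have hsube := pvSubm_exact M n 0 (by omega) hlen hrows
    have hent := pvSubm_entry M n 0 (by omega) hlen hrows
    simp only [pvLoop]
    by_cases hle : pvDet M ≤ 0
    · rw [if_pos hle]
      simp only [Bool.false_eq_true, false_iff]
      intro hP
      have h0 := ((PminPos_succ n (matL M)).mp hP).1
      rw [hd] at hle
      omega
    · rw [if_neg hle]
      rw [IH (pvSubm M 0 0) hsube.1 hsube.2]
      rw [PminPos_congr n (matL (pvSubm M 0 0)) (shiftF 1 (matL M))
        (by intro i k hi hk
            rw [hent i k hi hk]
            simp [shiftF])]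
      rw [PminPos_succ]
      rw [hd] at hle
      constructor
      · intro h; exact ⟨by omega, h⟩
      · intro h; exact h.2

-- B-side: the elimination step's entries
theorem altStep_rows (M : List (List Int)) :
    ∀ r ∈ altStep M, r.length = M.length - 1 := by
  intro r hr
  simp [altStep] at hr
  obtain ⟨x, -, rfl⟩ := hr
  simp

theorem altStep_entry (M : List (List Int)) (i j : Nat)
    (hi : i < M.length - 1) (hj : j < M.length - 1) :
    matL (altStep M) i j = elimF M.length (matL M) i j := by
  simp [altStep, matL, elimF, List.getD_eq_getElem?_getD, hi, hj]

-- auxiliary matrices for the elimination identity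
def elimN (s : Nat) (f : Nat → Nat → Int) : Matrix (Fin (s + 2)) (Fin (s + 2)) Int :=
  Matrix.of fun i j => f i j

def elimFMat (s : Nat) (f : Nat → Nat → Int) : Matrix (Fin (s + 2)) (Fin (s + 2)) Int :=
  Matrix.of fun i j =>
    if i = Fin.last (s + 1) then elimN s f i j
    else f (s + 1) (s + 1) * elimN s f i j -
      elimN s f i (Fin.last (s + 1)) * elimN s f (Fin.last (s + 1)) j

theorem elimN_apply (s : Nat) (f : Nat → Nat → Int) (i j : Fin (s + 2)) :
    elimN s f i j = f i j := rfl

theorem elimN_last_last (s : Nat) (f : Nat → Nat → Int) :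
    elimN s f (Fin.last (s + 1)) (Fin.last (s + 1)) = f (s + 1) (s + 1) := rfl

-- scaling all rows but the last multiplies the determinant by p^(s+1)
theorem elim_det_scaled (s : Nat) (f : Nat → Nat → Int) :
    (elimFMat s f).det = f (s + 1) (s + 1) ^ (s + 1) * (elimN s f).det := by
  have hstep : (elimFMat s f).det =
      (Matrix.of fun i j =>
        (if i = Fin.last (s + 1) then (1 : Int) else f (s + 1) (s + 1)) * elimN s f i j).det := by
    apply Matrix.det_eq_of_forall_row_eq_smul_add_const
      (fun i => if i = Fin.last (s + 1) then 0 else -(elimN s f i (Fin.last (s + 1))))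
      (Fin.last (s + 1)) (by simp)
    intro i j
    by_cases hi : i = Fin.last (s + 1)
    · simp [elimFMat, hi]
    · simp [elimFMat, hi]
      ring
  rw [hstep, Matrix.det_mul_column]
  congr 1
  rw [← Finset.mul_prod_erase Finset.univ _ (Finset.mem_univ (Fin.last (s + 1)))]
  rw [if_pos rfl, one_mul]
  rw [Finset.prod_congr rfl
    (fun i hi => if_neg (Finset.mem_erase.mp hi).1 :
      ∀ i ∈ Finset.univ.erase (Fin.last (s + 1)),
        (if i = Fin.last (s + 1) then (1 : Int) else f (s + 1) (s + 1)) = f (s + 1) (s + 1))]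
  rw [Finset.prod_const, Finset.card_erase_of_mem (Finset.mem_univ _)]
  simp

-- expanding the modified matrix along its last column
theorem elim_det_expand (s : Nat) (f : Nat → Nat → Int) :
    (elimFMat s f).det = f (s + 1) (s + 1) * Dm (s + 1) (elimF (s + 2) f) := by
  rw [Matrix.det_succ_column (elimFMat s f) (Fin.last (s + 1))]
  rw [Finset.sum_eq_single (Fin.last (s + 1))
    (fun i _ hi => by
      have hz : elimFMat s f i (Fin.last (s + 1)) = 0 := by
        simp only [elimFMat, Matrix.of_apply, if_neg hi, elimN_apply]
        have : ((Fin.last (s + 1) : Fin (s + 2)) : ℕ) = s + 1 := rfl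
        rw [this]
        ring
      rw [hz]
      ring)
    (fun h => absurd (Finset.mem_univ _) h)]
  have hll : elimFMat s f (Fin.last (s + 1)) (Fin.last (s + 1)) = f (s + 1) (s + 1) := by
    simp [elimFMat, elimN_last_last]
  have hsub : (elimFMat s f).submatrix (Fin.last (s + 1)).succAbove (Fin.last (s + 1)).succAbove
      = Matrix.of fun a b : Fin (s + 1) => elimF (s + 2) f a b := by
    ext a b
    have ha : (Fin.castSucc a) ≠ Fin.last (s + 1) := (Fin.castSucc_lt_last a).ne
    simp only [Fin.succAbove_last, Matrix.submatrix_apply, elimFMat, Matrix.of_apply,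
      if_neg ha, elimN_apply, elimF, Fin.val_castSucc]
    have h1 : ((Fin.last (s + 1) : Fin (s + 2)) : ℕ) = s + 1 := rfl
    have h2 : (s + 2 : ℕ) - 1 = s + 1 := rfl
    rw [h1, h2]
  rw [hll, hsub]
  have hpow : ((-1 : Int)) ^ (((Fin.last (s + 1) : Fin (s + 2)) : ℕ) +
      ((Fin.last (s + 1) : Fin (s + 2)) : ℕ)) = 1 := by
    have : ((Fin.last (s + 1) : Fin (s + 2)) : ℕ) = s + 1 := rfl
    rw [this, ← two_mul, pow_mul]
    norm_num
  rw [hpow]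
  unfold Dm
  ring

-- key determinant identity: p * det(eliminated block) = p^(s+1) * det(block), size s+2
theorem elim_det (s : Nat) (f : Nat → Nat → Int) :
    f (s + 1) (s + 1) * Dm (s + 1) (elimF (s + 2) f) =
      f (s + 1) (s + 1) ^ (s + 1) * Dm (s + 2) f := by
  rw [← elim_det_expand, elim_det_scaled]
  rfl

theorem pos_cancel (p X : Int) (hp : 0 < p) (h : 0 < p * X) : 0 < X := by
  nlinarith

-- peel the pivot off PminPos (the bottom-right 1×1 block) and eliminate
theorem PminPos_elim (n : Nat) (f : Nat → Nat → Int) :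
    PminPos (n + 1) f ↔ 0 < f n n ∧ PminPos n (elimF (n + 1) f) := by
  have hpiv : Dm 1 (shiftF n f) = f n n := by
    rw [Dm_one]; simp [shiftF]
  have hblk : ∀ i, i < n → Dm (n - i) (shiftF i (elimF (n + 1) f))
      = Dm (n - i) (elimF (n + 1 - i) (shiftF i f)) := by
    intro i hi
    apply Dm_congr
    intro a b ha hb
    simp only [shiftF, elimF]
    have e1 : (n + 1) - 1 = n := by omega
    have e2 : (n + 1 - i) - 1 = n - i := by omega
    rw [e1, e2]
    have e3 : n - i + i = n := by omega
    rw [e3]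
  have hpg : ∀ i, i < n → (shiftF i f) ((n - 1 - i) + 1) ((n - 1 - i) + 1) = f n n := by
    intro i hi
    simp only [shiftF]
    have e : n - 1 - i + 1 + i = n := by omega
    rw [e]
  constructor
  · intro h
    have hp : 0 < f n n := by
      have h0 := h n (by omega)
      rw [show n + 1 - n = 1 from by omega] at h0
      rwa [hpiv] at h0
    refine ⟨hp, ?_⟩
    intro i hi
    rw [hblk i hi]
    have e1 : n - i = (n - 1 - i) + 1 := by omega
    have e2 : n + 1 - i = (n - 1 - i) + 2 := by omega
    have hD := h i (by omega)
    rw [e2] at hD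
    rw [e1, e2]
    have key := elim_det (n - 1 - i) (shiftF i f)
    rw [hpg i hi] at key
    have hpos : 0 < f n n ^ ((n - 1 - i) + 1) * Dm ((n - 1 - i) + 2) (shiftF i f) :=
      mul_pos (pow_pos hp _) hD
    rw [← key] at hpos
    exact pos_cancel _ _ hp hpos
  · rintro ⟨hp, h⟩ i hi
    by_cases hin : i = n
    · rw [hin, show n + 1 - n = 1 from by omega, hpiv]
      exact hp
    · have hilt : i < n := by omega
      have hX := h i hilt
      rw [hblk i hilt] at hX
      have e1 : n - i = (n - 1 - i) + 1 := by omega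
      have e2 : n + 1 - i = (n - 1 - i) + 2 := by omega
      rw [e1, e2] at hX
      rw [e2]
      have key := elim_det (n - 1 - i) (shiftF i f)
      rw [hpg i hilt] at key
      have hpos : 0 < f n n * Dm ((n - 1 - i) + 1) (elimF ((n - 1 - i) + 2) (shiftF i f)) :=
        mul_pos hp hX
      rw [key] at hpos
      exact pos_cancel _ _ (pow_pos hp _) hpos

theorem loopB_iff (n : Nat) : ∀ M : List (List Int), M.length = n →
    (∀ r ∈ M, r.length = n) → (altLoop M = true ↔ PminPos n (matL M)) := by
  induction n with
  | zero =>
    intro M hlen hrows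
    have hM : M = [] := List.length_eq_zero_iff.mp hlen
    subst hM
    rw [altLoop, if_pos rfl]
    constructor
    · intro _ i hi; omega
    · intro _; rfl
  | succ n IH =>
    intro M hlen hrows
    have hne : M ≠ [] := by intro h; rw [h] at hlen; simp at hlen
    have hstep : altLoop M =
        if (M.getD (M.length - 1) []).getD (M.length - 1) 0 ≤ 0 then false
        else altLoop (altStep M) := by
      rw [altLoop, if_neg hne]
    have hm1 : M.length - 1 = n := by omega
    have hpv : (M.getD (M.length - 1) []).getD (M.length - 1) 0 = matL M n n := by
      rw [hm1]; rfl
    rw [hstep, hpv, PminPos_elim n (matL M)]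
    by_cases hle : matL M n n ≤ 0
    · rw [if_pos hle]
      simp only [Bool.false_eq_true, false_iff]
      intro hP
      omega
    · rw [if_neg hle]
      have hsl : (altStep M).length = n := by rw [altStep_len, hm1]
      have hsr : ∀ r ∈ altStep M, r.length = n := by
        intro r hr
        rw [altStep_rows M r hr, hm1]
      rw [IH (altStep M) hsl hsr]
      rw [PminPos_congr n (matL (altStep M)) (elimF (n + 1) (matL M))
        (by intro i k hi hk
            rw [altStep_entry M i k (by omega) (by omega), hlen])]
      constructor
      · intro h; exact ⟨by omega, h⟩
      · intro h; exact h.2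

theorem take_entry (A : List (List Int)) (hw : ∀ r ∈ A, A.length ≤ r.length)
    (i j : Nat) (hi : i < A.length) (hj : j < A.length) :
    matL (A.map (fun r => r.take A.length)) i j = matL A i j := by
  unfold matL
  have h1 : (A.map (fun r => r.take A.length)).getD i [] = (A[i]).take A.length := by
    rw [List.getD_eq_getElem?_getD, List.getElem?_map, List.getElem?_eq_getElem hi,
        Option.map_some, Option.getD_some]
  have h2 : A.getD i [] = A[i] := by
    rw [List.getD_eq_getElem?_getD, List.getElem?_eq_getElem hi]; rfl
  rw [h1, h2]
  have hj2 : j < (A[i]).length := lt_of_lt_of_le hj (hw _ (List.getElem_mem hi))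
  have hj3 : j < ((A[i]).take A.length).length := by
    rw [List.length_take]; omega
  rw [List.getD_eq_getElem?_getD, List.getElem?_eq_getElem hj3, Option.getD_some,
      List.getD_eq_getElem?_getD, List.getElem?_eq_getElem hj2, Option.getD_some,
      List.getElem_take]

-- ===== VERDICT (by name: the statement is the Claim_ definition above) =====
theorem is_pos_def_spec : Claim_equal_is_pos_def := by
  intro A _ hPre
  unfold Spec_is_pos_def
  obtain ⟨hne, hwide⟩ := hPre
  by_cases hsq : A.length = (A.headD []).length
  · have hn : 0 < A.length := List.length_pos_of_ne_nil hne
    have hw := hwide hsq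
    rw [is_pos_def, is_pos_def_alt, if_pos hsq, if_neg hne, if_neg (by omega), ← hsq]
    rw [Bool.eq_iff_iff]
    rw [loopA_iff A.length (pvCopy A A.length A.length) (pvCopy_len _ _ _) (pvCopy_rows _ _ _)]
    rw [loopB_iff A.length (A.map (fun r => r.take A.length))
      (by simp) (by intro r hr; simp only [List.mem_map] at hr; obtain ⟨s, hs, rfl⟩ := hr
                    simp [List.length_take, Nat.min_eq_left (hw s hs)])]
    rw [PminPos_congr A.length (matL (pvCopy A A.length A.length)) (matL A)
      (fun i j hi hj => pvCopy_entry A A.length A.length i j hi hj)]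
    rw [PminPos_congr A.length (matL (A.map (fun r => r.take A.length))) (matL A)
      (fun i j hi hj => take_entry A hw i j hi hj)]
  · rw [is_pos_def, is_pos_def_alt, if_neg hsq]
    rcases List.exists_cons_of_ne_nil hne with ⟨r, t, rfl⟩
    simp only [if_neg hne]
    rw [if_pos (by simpa using fun h => hsq h.symm)]
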